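-- pv_equiv track=rewrite | github.com/seanpattencode/aio | aio.py | parse_agent_specs_and_prompt
-- ===== SOURCE A (Python) =====
-- CODEX_PROMPT = None
--
-- def parse_agent_specs_and_prompt(argv, start_idx):
--     """Parse agent specifications and prompt from command line arguments.
--
--     Returns: (agent_specs, prompt, using_default_protocol)
--         agent_specs: list of (agent_key, count) tuples
--         prompt: the final prompt string
--         using_default_protocol: bool indicating if default prompt was used
--     """
--     agent_specs, prompt_parts, parsing_agents = [], [], True
--
--     for arg_part in argv[start_idx:]:
--         if arg_part in ['--seq', '--sequential']:
--             continue
--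
--         if parsing_agents and ':' in arg_part and len(arg_part) <= 4:
--             parts = arg_part.split(':')
--             if len(parts) == 2 and parts[0] in ['c', 'l', 'g'] and parts[1].isdigit():
--                 agent_specs.append((parts[0], int(parts[1])))
--                 continue
--
--         parsing_agents = False
--         prompt_parts.append(arg_part)
--
--     return (agent_specs, CODEX_PROMPT, True) if not prompt_parts else (agent_specs, ' '.join(prompt_parts), False)
-- ===== SOURCE B (Python) =====
-- CODEX_PROMPT = None
--
-- SKIP = ('--seq', '--sequential')
--
-- def _spec(arg):
--     """Return (key, count) if arg is a valid agent spec, else None."""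
--     if ':' not in arg or len(arg) > 4:
--         return None
--     parts = arg.split(':')
--     if len(parts) == 2 and parts[0] in ('c', 'l', 'g') and parts[1].isdigit():
--         return (parts[0], int(parts[1]))
--     return None
--
-- def parse_agent_specs_and_prompt(argv, start_idx):
--     # Single RIGHT-TO-LEFT pass: specs seen so far stay pending; the moment a
--     # non-spec word appears (to their left), everything pending belongs to the
--     # prompt, so it is flushed (as raw text) into the prompt.  Both lists are
--     # built in reversed order (appends only) and reversed once at the end.
--     pending_rev, prompt_rev = [], []
--     for a in reversed(argv[start_idx:]):
--         if a in SKIP: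
--             continue
--         s = _spec(a)
--         if s is not None:
--             pending_rev.append((a, s))
--         else:
--             prompt_rev.extend(raw for raw, _ in pending_rev)
--             prompt_rev.append(a)
--             pending_rev = []
--     agent_specs = [s for _, s in reversed(pending_rev)]
--     if not prompt_rev:
--         return (agent_specs, CODEX_PROMPT, True)
--     return (agent_specs, ' '.join(reversed(prompt_rev)), False)
-- ===== Notes on version B (the rewrite author's own statement) =====
-- stated objective: alternative
-- what changed: Replaces A's left-to-right stateful scan (parsing_agents flag) by a single right-to-left pass that keeps a pending buffer of trailing specs and flushes it into the prompt the moment a non-spec word appears to its left.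
import Mathlib
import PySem

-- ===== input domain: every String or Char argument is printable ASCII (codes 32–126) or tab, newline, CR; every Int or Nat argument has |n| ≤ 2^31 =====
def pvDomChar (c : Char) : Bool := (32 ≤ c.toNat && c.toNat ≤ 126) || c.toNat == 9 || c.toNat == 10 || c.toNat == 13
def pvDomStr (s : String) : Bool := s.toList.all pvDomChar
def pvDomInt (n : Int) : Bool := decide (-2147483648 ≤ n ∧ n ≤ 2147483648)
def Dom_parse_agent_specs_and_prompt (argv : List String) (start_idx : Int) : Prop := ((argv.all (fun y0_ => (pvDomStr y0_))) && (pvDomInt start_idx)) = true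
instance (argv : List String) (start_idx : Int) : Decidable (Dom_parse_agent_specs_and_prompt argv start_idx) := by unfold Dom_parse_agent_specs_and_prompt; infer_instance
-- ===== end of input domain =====

-- B replaces A's left-to-right scan with a parsing_agents flag by a single right-to-left
-- pass with a pending-specs buffer flushed into the prompt at the first non-spec word (objective: alternative).

-- ===== PORT A =====
-- A's loop body: state (agent_specs, prompt_parts, parsing_agents)
def pvStepA (st : (List (String × Int)) × List String × Bool) (arg : String) :
    (List (String × Int)) × List String × Bool :=
  match st with
  | (specs, pp, flag) =>
    if arg == "--seq" || arg == "--sequential" then (specs, pp, flag)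
    else if flag && PySem.Str.isIn ":" arg && decide (PySem.Str.len arg ≤ 4) then
      -- ':' ≠ "" so split? always returns some
      match (PySem.Str.split? arg ":").getD [] with
      | [p0, p1] =>
        if (p0 == "c" || p0 == "l" || p0 == "g") && PySem.Str.strIsdigit p1 then
          -- isdigit guarantees int() parses, so ofStr? is some here
          (specs ++ [(p0, (PySem.Int.ofStr? p1).getD 0)], pp, flag)
        else (specs, pp ++ [arg], false)
      | _ => (specs, pp ++ [arg], false)
    else (specs, pp ++ [arg], false)

def parse_agent_specs_and_prompt (argv : List String) (start_idx : Int) : (List (String × Int)) × Option String × Bool :=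
  match (PySem.List.slice argv (some start_idx) none).foldl pvStepA ([], [], true) with
  | (specs, pp, _) =>
    if pp.isEmpty then (specs, none, true)
    else (specs, some (PySem.Str.join " " pp), false)

-- ===== PORT B =====
def pvIsSkip (a : String) : Bool := a == "--seq" || a == "--sequential"

def pvSpec? (a : String) : Option (String × Int) :=
  if !(PySem.Str.isIn ":" a) || decide (PySem.Str.len a > 4) then none
  else
    match (PySem.Str.split? a ":").getD [] with
    | [p0, p1] =>
      if (p0 == "c" || p0 == "l" || p0 == "g") && PySem.Str.strIsdigit p1 then
        some (p0, (PySem.Int.ofStr? p1).getD 0)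
      else none
    | _ => none

-- B's right-to-left step: state (pending_rev raw+parsed specs, prompt_rev), both built by appending
def pvStepB (st : List (String × String × Int) × List String) (a : String) :
    List (String × String × Int) × List String :=
  if pvIsSkip a then st
  else
    match pvSpec? a with
    | some s => (st.1 ++ [(a, s)], st.2)
    | none => ([], (st.2 ++ st.1.map Prod.fst) ++ [a])

def parse_agent_specs_and_prompt_alt (argv : List String) (start_idx : Int) : (List (String × Int)) × Option String × Bool :=
  -- 'for a in reversed(rest)': a left fold over the reversed slice
  match ((PySem.List.slice argv (some start_idx) none).reverse).foldl pvStepB ([], []) with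
  | (pending_rev, prompt_rev) =>
    if prompt_rev.isEmpty then ((pending_rev.reverse).map Prod.snd, none, true)
    else ((pending_rev.reverse).map Prod.snd, some (PySem.Str.join " " prompt_rev.reverse), false)

-- ===== PRECONDITION & SPEC =====
def Spec_parse_agent_specs_and_prompt (argv : List String) (start_idx : Int) (out : (List (String × Int)) × Option String × Bool) : Prop := out = parse_agent_specs_and_prompt_alt argv start_idx
instance (argv : List String) (start_idx : Int) (out : (List (String × Int)) × Option String × Bool) : Decidable (Spec_parse_agent_specs_and_prompt argv start_idx out) := by unfold Spec_parse_agent_specs_and_prompt; infer_instance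

-- ===== CLAIM (what is proved, stated in full; the proofs are below) =====
def Claim_equal_parse_agent_specs_and_prompt : Prop := ∀ (argv : List String) (start_idx : Int), Dom_parse_agent_specs_and_prompt argv start_idx → Spec_parse_agent_specs_and_prompt argv start_idx (parse_agent_specs_and_prompt argv start_idx)

-- ===== LEMMAS AND PROOFS =====

-- Proof-side characterisation of both folds: consume leading specs (skipping flags), keep the suffix.
def pvConsume2 : List String → List (String × String × Int) × List String
  | [] => ([], [])
  | a :: t =>
    if pvIsSkip a then pvConsume2 t
    else
      match pvSpec? a with
      | some s => ((a, s) :: (pvConsume2 t).1, (pvConsume2 t).2)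
      | none => ([], a :: t)

-- Removing skip tokens from l keeps the raw consumed specs followed by the filtered suffix.
theorem pvFilter_decomp (l : List String) :
    l.filter (fun a => !pvIsSkip a)
      = (pvConsume2 l).1.map Prod.fst ++ (pvConsume2 l).2.filter (fun a => !pvIsSkip a) := by
  induction l with
  | nil => simp [pvConsume2]
  | cons a t ih =>
    by_cases h : pvIsSkip a = true
    · simp [pvConsume2, h, ih]
    · have h' : pvIsSkip a = false := by simpa using h
      rcases hs : pvSpec? a with _ | s
      · simp [pvConsume2, h', hs, List.filter_cons]
      · simp [pvConsume2, h', hs, List.filter_cons, ih]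

-- B's backwards fold computes the reversed consumed specs and the reversed skip-filtered suffix.
theorem pvFoldB (l : List String) :
    l.reverse.foldl pvStepB ([], [])
      = ((pvConsume2 l).1.reverse, ((pvConsume2 l).2.filter (fun a => !pvIsSkip a)).reverse) := by
  rw [List.foldl_reverse]
  induction l with
  | nil => simp [pvConsume2]
  | cons a t ih =>
    rw [List.foldr_cons, ih]
    by_cases h : pvIsSkip a = true
    · simp [pvStepB, pvConsume2, h]
    · have h' : pvIsSkip a = false := by simpa using h
      rcases hs : pvSpec? a with _ | s
      · simp [pvStepB, pvConsume2, h', hs, List.filter_cons, pvFilter_decomp t]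
      · simp [pvStepB, pvConsume2, h', hs]

-- Once the flag is false, A's loop just appends every non-skip token to prompt_parts.
theorem pvFoldA_false (l : List String) (specs : List (String × Int)) (pp : List String) :
    l.foldl pvStepA (specs, pp, false) = (specs, pp ++ l.filter (fun a => !pvIsSkip a), false) := by
  induction l generalizing pp with
  | nil => simp
  | cons a t ih =>
    by_cases h : pvIsSkip a = true
    · have hstep : pvStepA (specs, pp, false) a = (specs, pp, false) := by
        simp [pvStepA, pvIsSkip] at h ⊢
        rcases h with h | h <;> simp [h]
      simp [List.foldl_cons, hstep, ih, h]
    · have hstep : pvStepA (specs, pp, false) a = (specs, pp ++ [a], false) := by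
        simp [pvStepA, pvIsSkip] at h ⊢
        simp [h.1, h.2]
      simp [List.foldl_cons, hstep, ih, h]

-- A's step in the flag-true state, expressed through B's pvSpec?.
theorem pvStepA_true_spec (specs : List (String × Int)) (pp : List String) (a : String)
    (hskip : pvIsSkip a = false) :
    pvStepA (specs, pp, true) a =
      match pvSpec? a with
      | some s => (specs ++ [s], pp, true)
      | none => (specs, pp ++ [a], false) := by
  have h12 : (a == "--seq" || a == "--sequential") = false := by
    simpa [pvIsSkip] using hskip
  have key : (true && PySem.Str.isIn ":" a && decide (PySem.Str.len a ≤ 4))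
      = !(!(PySem.Str.isIn ":" a) || decide (PySem.Str.len a > 4)) := by
    cases h : PySem.Str.isIn ":" a <;> simp [h, ← decide_not, Nat.not_lt]
  simp only [pvStepA, pvSpec?, h12, Bool.false_eq_true, if_false, key]
  cases hc : (!(PySem.Str.isIn ":" a) || decide (PySem.Str.len a > 4)) with
  | true => simp only [hc, Bool.not_true, Bool.false_eq_true, if_false, if_true]
  | false =>
    simp only [hc, Bool.not_false, if_true, Bool.false_eq_true, if_false]
    rcases hm : (PySem.Str.split? a ":").getD [] with _ | ⟨p0, _ | ⟨p1, _ | _⟩⟩ <;>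
      try rfl
    cases hb : ((p0 == "c" || p0 == "l" || p0 == "g") && PySem.Str.strIsdigit p1) <;>
      simp only [hb, Bool.false_eq_true, if_false, if_true]

-- A's flag-true fold through the same characterisation (specs accumulator generalized).
theorem pvFoldA_true (l : List String) (specs : List (String × Int)) :
    l.foldl pvStepA (specs, [], true) =
      (specs ++ (pvConsume2 l).1.map Prod.snd,
       (pvConsume2 l).2.filter (fun a => !pvIsSkip a),
       ((pvConsume2 l).2.filter (fun a => !pvIsSkip a)).isEmpty) := by
  induction l generalizing specs with
  | nil => simp [pvConsume2]
  | cons a t ih =>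
    by_cases h : pvIsSkip a = true
    · have hstep : pvStepA (specs, [], true) a = (specs, [], true) := by
        simp [pvStepA, pvIsSkip] at h ⊢
        rcases h with h | h <;> simp [h]
      simp [List.foldl_cons, hstep, ih, pvConsume2, h]
    · have h' : pvIsSkip a = false := by simpa using h
      rcases hs : pvSpec? a with _ | s
      · have hstep := pvStepA_true_spec specs [] a h'
        rw [hs] at hstep
        simp only [List.foldl_cons, hstep, pvFoldA_false, pvConsume2, h', hs]
        simp [h']
      · have hstep := pvStepA_true_spec specs [] a h'
        rw [hs] at hstep
        simp only [List.foldl_cons, hstep, ih, pvConsume2, h', hs]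
        simp

-- ===== VERDICT (by name: the statement is the Claim_ definition above) =====
theorem parse_agent_specs_and_prompt_spec : Claim_equal_parse_agent_specs_and_prompt := by
  intro argv start_idx _
  unfold Spec_parse_agent_specs_and_prompt parse_agent_specs_and_prompt parse_agent_specs_and_prompt_alt
  rw [pvFoldA_true, pvFoldB]
  simp
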